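-- pv_equiv track=rewrite | github.com/heliumman/AdventOfCode | 2020/python/day20B.py | join_tiles
-- ===== SOURCE A (Python) =====
-- def join_tiles(tiles):
--     pic = []
--
--     for ts in tiles:
--         i = 1
--         while i < len(tiles[0][0]) - 1:
--             tmp = []
--             for t in ts:
--                 j = 1
--                 while j < len(tiles[0][0]) - 1:
--                     tmp.append(t[i][j])
--                     j = j + 1
--             i = i + 1
--             pic.append(tmp)
--
--     return pic
-- ===== SOURCE B (Python) =====
-- def join_tiles(tiles):
--     pic = []
--     if not tiles:
--         return pic
--     n = len(tiles[0][0])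
--     for ts in tiles:
--         blocks = [[row[1:n-1] for row in t[1:n-1]] for t in ts]
--         for k in range(n - 2):
--             pic.append([c for b in blocks for c in b[k]])
--     return pic
-- ===== Notes on version B (the rewrite author's own statement) =====
-- stated objective: simpler
-- what changed: Replaced A's three nested index-counting while-loops with per-tile border stripping via slices (t[1:n-1], row[1:n-1]) and row-wise concatenation of the stripped blocks.
import Mathlib
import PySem

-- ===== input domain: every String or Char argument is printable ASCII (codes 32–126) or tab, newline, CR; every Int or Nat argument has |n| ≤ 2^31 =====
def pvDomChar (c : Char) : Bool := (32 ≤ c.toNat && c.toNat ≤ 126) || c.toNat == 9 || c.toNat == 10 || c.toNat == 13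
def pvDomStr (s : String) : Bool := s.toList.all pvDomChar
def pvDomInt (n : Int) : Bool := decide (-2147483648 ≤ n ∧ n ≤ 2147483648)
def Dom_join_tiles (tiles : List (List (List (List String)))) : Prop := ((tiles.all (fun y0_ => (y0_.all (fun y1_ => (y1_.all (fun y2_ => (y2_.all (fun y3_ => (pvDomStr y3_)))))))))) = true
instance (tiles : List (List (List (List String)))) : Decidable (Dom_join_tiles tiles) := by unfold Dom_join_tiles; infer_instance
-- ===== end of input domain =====

-- B replaces A's three nested index while-loops by per-tile border stripping with slices plus row-wise concatenation of the stripped blocks (objective: simpler).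

-- ===== PORT A =====
-- A's two 'while' counters i, j each run over 1 .. n-2 (n = len(tiles[0][0])); ported as folds over List.range (n-2) with the offset written out.
def join_tiles (tiles : List (List (List (List String)))) : List (List String) :=
  let n : Nat := ((tiles.headD []).headD []).length
  tiles.foldl (fun pic ts =>
    (List.range (n - 2)).foldl (fun pic i0 =>
      pic ++ [ts.foldl (fun tmp t =>
        (List.range (n - 2)).foldl (fun tmp j0 =>
          tmp ++ [(t.getD (i0 + 1) []).getD (j0 + 1) ""]) tmp) []]) pic) []

-- ===== PORT B =====
def join_tiles_alt (tiles : List (List (List (List String)))) : List (List String) :=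
  match tiles with
  | [] => []
  | b0 :: _ =>
    let n : Nat := (b0.headD []).length
    tiles.foldl (fun pic ts =>
      let blocks := ts.map (fun t =>
        (PySem.List.slice t (some 1) (some ((n : Int) - 1))).map (fun row =>
          PySem.List.slice row (some 1) (some ((n : Int) - 1))))
      pic ++ (List.range (n - 2)).map (fun k =>
        (blocks.map (fun b => b.getD k [])).flatten)) []

-- ===== PRECONDITION & SPEC =====
-- Pre_ excludes exactly the inputs on which A raises IndexError: a nonempty tiles whose first band is empty
-- (tiles[0][0] fails), or, when n ≥ 3, a tile with fewer than n-1 rows or an accessed row shorter than n-1.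
def Pre_join_tiles (tiles : List (List (List (List String)))) : Prop :=
  tiles = [] ∨
    (tiles.headD [] ≠ [] ∧
      (3 ≤ ((tiles.headD []).headD []).length →
        ∀ ts ∈ tiles, ∀ t ∈ ts,
          ((tiles.headD []).headD []).length - 1 ≤ t.length ∧
          ∀ row ∈ (t.drop 1).take (((tiles.headD []).headD []).length - 2),
            ((tiles.headD []).headD []).length - 1 ≤ row.length))
instance (tiles : List (List (List (List String)))) : Decidable (Pre_join_tiles tiles) := by
  unfold Pre_join_tiles; infer_instance

def pvWitness_join_tiles : List (List (List (List String))) :=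
  [[[["a","b","c"],["d","e","f"],["g","h","i"]]]]

def Spec_join_tiles (tiles : List (List (List (List String)))) (out : List (List String)) : Prop := out = join_tiles_alt tiles
instance (tiles : List (List (List (List String)))) (out : List (List String)) : Decidable (Spec_join_tiles tiles out) := by unfold Spec_join_tiles; infer_instance

-- ===== CLAIM (what is proved, stated in full; the proofs are below) =====
def Claim_equal_join_tiles : Prop := ∀ (tiles : List (List (List (List String)))), Dom_join_tiles tiles → Pre_join_tiles tiles → Spec_join_tiles tiles (join_tiles tiles)

-- ===== LEMMAS AND PROOFS =====

-- stripping a border by drop/take equals reading the entries by index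
lemma strip_eq {α : Type} (t : List α) (n2 : Nat) (d : α) (ht : n2 + 1 ≤ t.length) :
    (t.drop 1).take n2 = (List.range n2).map (fun j => t.getD (j + 1) d) := by
  apply List.ext_getElem
  · simp; omega
  · intro i h1 h2
    simp only [List.getElem_take, List.getElem_drop, List.getElem_map, List.getElem_range]
    rw [List.getD_eq_getElem t d (by simp at h2 ⊢; omega)]
    simp [Nat.add_comm]

lemma getD_strip {α : Type} (t : List α) (n2 k : Nat) (d : α) (ht : n2 + 1 ≤ t.length)
    (hk : k < n2) : ((t.drop 1).take n2).getD k d = t.getD (k + 1) d := by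
  rw [strip_eq t n2 d ht]
  rw [List.getD_eq_getElem _ d (by simpa using hk)]
  simp

lemma slice_one_sub_one {α : Type} (t : List α) (n : Nat) (h3 : 3 ≤ n) :
    PySem.List.slice t (some 1) (some ((n : Int) - 1)) = (t.drop 1).take (n - 2) := by
  have h1 : ((n : Int) - 1) = ((n - 1 : Nat) : Int) := by omega
  have h2 : ((1 : Nat) : Int) = (1 : Int) := by norm_num
  rw [h1, ← h2, PySem.List.slice_natCast, Nat.sub_sub]

-- a double append-loop builds the flatten of the per-element rows
lemma foldl_double {α β γ : Type} (ts : List α) (r : List γ) (f : α → γ → β) (acc : List β) :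
    ts.foldl (fun tmp t => r.foldl (fun tmp j => tmp ++ [f t j]) tmp) acc
      = acc ++ (ts.map (fun t => r.map (f t))).flatten := by
  induction ts generalizing acc with
  | nil => simp
  | cons t ts ih =>
    simp only [List.foldl_cons, ih, List.map_cons, List.flatten_cons]
    rw [PySem.List.foldl_append_singleton_eq_map]
    simp [List.append_assoc]

-- ===== VERDICT (by name: the statement is the Claim_ definition above) =====
theorem join_tiles_spec : Claim_equal_join_tiles := by
  intro tiles _ hpre
  unfold Spec_join_tiles join_tiles join_tiles_alt
  cases tiles with
  | nil => rfl
  | cons b0 rest =>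
    rcases hpre with h | ⟨hb0, hcond⟩
    · exact absurd h (by simp)
    simp only [List.headD_cons] at hcond ⊢
    set n : Nat := (b0.headD []).length with hn
    apply PySem.List.foldl_congr_mem
    intro pic ts hts
    rw [PySem.List.foldl_append_singleton_eq_map]
    congr 1
    apply List.map_congr_left
    intro k hk
    simp only [List.mem_range] at hk
    have h3 : 3 ≤ n := by omega
    -- A's inner double loop over one output row, as flatten of per-tile rows
    have hrow := foldl_double ts (List.range (n - 2))
      (fun t j0 => (t.getD (k + 1) []).getD (j0 + 1) "") []
    rw [List.nil_append] at hrow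
    rw [hrow, List.map_map]
    congr 1
    apply List.map_congr_left
    intro t ht
    obtain ⟨hlen, hrows⟩ := hcond h3 ts hts t ht
    simp only [Function.comp]
    rw [slice_one_sub_one t n h3]
    have hXlen : k < ((t.drop 1).take (n - 2)).length := by
      rw [List.length_take, List.length_drop]; omega
    conv_rhs => rw [List.getD_eq_getElem _ [] (by rw [List.length_map]; exact hXlen)]
    simp only [List.getElem_map]
    have hmem : ((t.drop 1).take (n - 2))[k] ∈ (t.drop 1).take (n - 2) :=
      List.getElem_mem _
    have hrowlen := hrows _ hmem
    have hgd : ((t.drop 1).take (n - 2))[k] = t.getD (k + 1) [] := by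
      rw [← List.getD_eq_getElem _ [] hXlen]
      exact getD_strip t (n - 2) k [] (by omega) hk
    rw [slice_one_sub_one _ n h3, hgd]
    rw [hgd] at hrowlen
    exact (strip_eq (t.getD (k + 1) []) (n - 2) "" (by omega)).symm
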